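-- pv_equiv track=rewrite | github.com/Vijay6923/Recursion-solution | contest3/codeforces/special_character.py | min_moves_to_divisible_by_three
-- ===== SOURCE A (Python) =====
-- def min_moves_to_divisible_by_three(n, arr):
--     remainder_counts = [0, 0, 0]
--     total_sum = sum(arr)
--
--     for num in arr:
--         remainder_counts[num % 3] += 1
--
--     min_moves = 0
--     target = total_sum % 3
--
--     if target == 1:
--         if remainder_counts[1] >= 1:
--             min_moves = 1
--         elif remainder_counts[2] >= 2:
--             min_moves = 2
--         else:
--             min_moves = -1
--     elif target == 2:
--         if remainder_counts[2] >= 1: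
--             min_moves = 1
--         elif remainder_counts[1] >= 2:
--             min_moves = 2
--         else:
--             min_moves = -1
--
--     return min_moves
-- ===== SOURCE B (Python) =====
-- def min_moves_to_divisible_by_three(n, arr):
--     # DP: best[r] = min number of removed elements whose sum is ≡ r (mod 3); None = impossible
--     best = [0, None, None]
--     for num in arr:
--         prev = best[:]
--         for r in (0, 1, 2):
--             if prev[r] is not None:
--                 cand = prev[r] + 1
--                 j = (r + num) % 3
--                 if best[j] is None or cand < best[j]:
--                     best[j] = cand
--     target = sum(arr) % 3
--     return best[target] if best[target] is not None else -1
-- ===== Notes on version B (the rewrite author's own statement) =====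
-- stated objective: alternative
-- what changed: Replaces A's remainder-bucket counting plus hand-written case analysis over the sum's residue by a per-element dynamic program relaxing best[r] = minimum number of removed elements whose sum is congruent to r (mod 3), reading off best[sum % 3] at the end.
import Mathlib
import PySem

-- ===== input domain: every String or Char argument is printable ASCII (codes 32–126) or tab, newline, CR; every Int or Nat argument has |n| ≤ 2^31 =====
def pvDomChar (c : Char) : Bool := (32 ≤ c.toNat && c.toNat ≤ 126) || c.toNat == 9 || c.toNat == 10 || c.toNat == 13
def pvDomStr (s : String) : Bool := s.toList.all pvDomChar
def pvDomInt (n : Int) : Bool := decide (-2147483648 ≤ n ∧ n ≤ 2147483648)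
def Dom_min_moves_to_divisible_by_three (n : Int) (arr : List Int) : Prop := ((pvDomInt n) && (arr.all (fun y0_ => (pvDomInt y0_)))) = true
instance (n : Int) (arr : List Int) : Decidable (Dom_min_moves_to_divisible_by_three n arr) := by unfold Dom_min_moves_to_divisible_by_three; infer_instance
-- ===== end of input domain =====

-- B replaces A's remainder-bucket counts + residue case analysis by a per-element DP over
-- minimum removed-sum residues (objective: alternative algorithm, same O(n) cost).


-- ===== PORT A =====
-- remainder_counts is a Python list of 3 ints indexed by num % 3; since num % 3 ∈ {0,1,2}
-- (Python mod, positive divisor) the indexing never raises, and the list is ported as a triple.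
def pvIncA (rc : Int × Int × Int) (num : Int) : Int × Int × Int :=
  let m := PySem.Int.mod num 3
  if m = 0 then (rc.1 + 1, rc.2.1, rc.2.2)
  else if m = 1 then (rc.1, rc.2.1 + 1, rc.2.2)
  else (rc.1, rc.2.1, rc.2.2 + 1)

def min_moves_to_divisible_by_three (n : Int) (arr : List Int) : Int :=
  let total_sum : Int := arr.foldl (· + ·) 0
  let rc := arr.foldl pvIncA (0, 0, 0)
  let target := PySem.Int.mod total_sum 3
  if target = 1 then
    if rc.2.1 ≥ 1 then 1
    else if rc.2.2 ≥ 2 then 2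
    else -1
  else if target = 2 then
    if rc.2.2 ≥ 1 then 1
    else if rc.2.1 ≥ 2 then 2
    else -1
  else 0

-- ===== PORT B =====
-- B's `best` is a Python list [b0, b1, b2] of int-or-None; ported as a triple of Option Int.
def pvGetSlot (best : Option Int × Option Int × Option Int) (j : Int) : Option Int :=
  if j = 0 then best.1 else if j = 1 then best.2.1 else best.2.2

-- `if best[j] is None or cand < best[j]: best[j] = cand`
def pvSetMin (best : Option Int × Option Int × Option Int) (j : Int) (cand : Int) :
    Option Int × Option Int × Option Int :=
  let upd : Option Int → Option Int := fun o =>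
    match o with
    | none => some cand
    | some v => if cand < v then some cand else some v
  if j = 0 then (upd best.1, best.2.1, best.2.2)
  else if j = 1 then (best.1, upd best.2.1, best.2.2)
  else (best.1, best.2.1, upd best.2.2)

-- body of `for r in (0, 1, 2): ...` with prev = best[:]
def pvRelaxR (prev : Option Int × Option Int × Option Int)
    (best : Option Int × Option Int × Option Int) (r num : Int) :
    Option Int × Option Int × Option Int :=
  match pvGetSlot prev r with
  | none => best
  | some v => pvSetMin best (PySem.Int.mod (r + num) 3) (v + 1)

def pvStepB (best : Option Int × Option Int × Option Int) (num : Int) :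
    Option Int × Option Int × Option Int :=
  let prev := best
  let best := pvRelaxR prev best 0 num
  let best := pvRelaxR prev best 1 num
  let best := pvRelaxR prev best 2 num
  best

def min_moves_to_divisible_by_three_alt (n : Int) (arr : List Int) : Int :=
  let best := arr.foldl pvStepB (some 0, none, none)
  let target := PySem.Int.mod (arr.foldl (· + ·) 0) 3
  match pvGetSlot best target with
  | some v => v
  | none => -1

-- ===== PRECONDITION & SPEC =====
def Spec_min_moves_to_divisible_by_three (n : Int) (arr : List Int) (out : Int) : Prop := out = min_moves_to_divisible_by_three_alt n arr
instance (n : Int) (arr : List Int) (out : Int) : Decidable (Spec_min_moves_to_divisible_by_three n arr out) := by unfold Spec_min_moves_to_divisible_by_three; infer_instance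

-- ===== CLAIM (what is proved, stated in full; the proofs are below) =====
def Claim_equal_min_moves_to_divisible_by_three : Prop := ∀ (n : Int) (arr : List Int), Dom_min_moves_to_divisible_by_three n arr → Spec_min_moves_to_divisible_by_three n arr (min_moves_to_divisible_by_three n arr)

-- ===== LEMMAS AND PROOFS =====

-- count of elements with Python-mod-3 residue r
def pvCnt (r : Int) (xs : List Int) : Nat := xs.countP (fun x => PySem.Int.mod x 3 == r)

-- closed form of B's DP state as a function of the residue-1 / residue-2 counts
def pvS (a b : Nat) : Option Int × Option Int × Option Int :=
  (some 0,
   if 1 ≤ a then some 1 else if 2 ≤ b then some 2 else none,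
   if 1 ≤ b then some 1 else if 2 ≤ a then some 2 else none)

theorem pvMod3_cases (x : Int) :
    PySem.Int.mod x 3 = 0 ∨ PySem.Int.mod x 3 = 1 ∨ PySem.Int.mod x 3 = 2 := by
  have h1 := PySem.Int.mod_nonneg x (b := 3) (by norm_num)
  have h2 := PySem.Int.mod_lt x (b := 3) (by norm_num)
  omega

theorem pvMod3_shift (r x : Int) :
    PySem.Int.mod (r + x) 3 = PySem.Int.mod (r + PySem.Int.mod x 3) 3 := by
  rw [PySem.Int.mod_eq_emod_of_pos (by norm_num), PySem.Int.mod_eq_emod_of_pos (by norm_num),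
    PySem.Int.mod_eq_emod_of_pos (by norm_num)]
  omega

theorem pvCnt_cons (r x : Int) (xs : List Int) :
    pvCnt r (x :: xs) = (if PySem.Int.mod x 3 = r then 1 else 0) + pvCnt r xs := by
  simp only [pvCnt, List.countP_cons, beq_iff_eq]
  split_ifs <;> omega

theorem pvStepB_S (a b : Nat) (x : Int) :
    pvStepB (pvS a b) x =
      pvS (a + (if PySem.Int.mod x 3 = 1 then 1 else 0))
          (b + (if PySem.Int.mod x 3 = 2 then 1 else 0)) := by
  have h0 := pvMod3_shift 0 x
  have h1 := pvMod3_shift 1 x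
  have h2 := pvMod3_shift 2 x
  rcases pvMod3_cases x with hm | hm | hm <;>
    rw [hm] at h0 h1 h2 <;>
    simp only [pvStepB, pvRelaxR, h0, h1, h2, hm] <;>
    rcases a with _ | _ | a <;> rcases b with _ | _ | b <;>
    simp [pvS, pvGetSlot, pvSetMin]

theorem pvFoldB (xs : List Int) (a b : Nat) :
    xs.foldl pvStepB (pvS a b) = pvS (a + pvCnt 1 xs) (b + pvCnt 2 xs) := by
  induction xs generalizing a b with
  | nil => simp [pvCnt]
  | cons x xs ih =>
    simp only [List.foldl_cons, pvStepB_S, ih, pvCnt_cons]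
    ring_nf

theorem pvFoldA (xs : List Int) (c0 c1 c2 : Int) :
    xs.foldl pvIncA (c0, c1, c2) =
      (c0 + (pvCnt 0 xs : Int), c1 + (pvCnt 1 xs : Int), c2 + (pvCnt 2 xs : Int)) := by
  induction xs generalizing c0 c1 c2 with
  | nil => simp [pvCnt]
  | cons x xs ih =>
    rcases pvMod3_cases x with hm | hm | hm <;>
      simp only [List.foldl_cons, pvIncA, hm, ih, pvCnt_cons, Prod.mk.injEq] <;>
      norm_num <;> ring

-- ===== VERDICT (by name: the statement is the Claim_ definition above) =====
theorem min_moves_to_divisible_by_three_spec : Claim_equal_min_moves_to_divisible_by_three := by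
  intro n arr _
  unfold Spec_min_moves_to_divisible_by_three
  unfold min_moves_to_divisible_by_three min_moves_to_divisible_by_three_alt
  have hA := pvFoldA arr 0 0 0
  have hinit : ((some 0 : Option Int), (none : Option Int), (none : Option Int)) = pvS 0 0 := by
    simp [pvS]
  have hB := pvFoldB arr 0 0
  rw [hinit]
  simp only [hA, hB, zero_add]
  rcases pvMod3_cases (arr.foldl (· + ·) 0) with h | h | h <;> rw [h] <;>
    norm_num [pvGetSlot, pvS] <;> split_ifs <;> simp_all
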